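-- pv_equiv track=rewrite | github.com/Mechatronics-SDSU/software-workflow-intro | src/example/styling_guide_ex_4.py | fibonacci_correct
-- ===== SOURCE A (Python) =====
-- def fibonacci_correct(num_a: int, num_b: int) -> list:
--     """
--     Calculates the fibonacci sequence to 10 numbers.
--     a + b = c, a = b, b = c Are the 3 basic operations.
--     :param num_a: the initial a value.
--     :param num_b: the initial b value.
--     :return: list object with all results.
--     """
--     ret_val = [num_a, num_b]
--     for i in range(2, 10):
--         num_c = num_a + num_b
--         ret_val.append(num_c)
--         num_a = num_b
--         num_b = num_c
--     return ret_val
-- ===== SOURCE B (Python) =====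
-- # Closed form: term_k = c_a*num_a + c_b*num_b with precomputed Fibonacci coefficients.
-- _COEFFS = [(1, 0), (0, 1), (1, 1), (1, 2), (2, 3), (3, 5), (5, 8), (8, 13), (13, 21), (21, 34)]
--
-- def fibonacci_correct(num_a: int, num_b: int) -> list:
--     return [ca * num_a + cb * num_b for ca, cb in _COEFFS]
-- ===== Notes on version B (the rewrite author's own statement) =====
-- stated objective: alternative
-- what changed: Replaces the rolling a+b recurrence loop with a comprehension over ten precomputed Fibonacci coefficient pairs, computing each term as a closed-form linear combination ca*num_a + cb*num_b of the seeds.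
import Mathlib
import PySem

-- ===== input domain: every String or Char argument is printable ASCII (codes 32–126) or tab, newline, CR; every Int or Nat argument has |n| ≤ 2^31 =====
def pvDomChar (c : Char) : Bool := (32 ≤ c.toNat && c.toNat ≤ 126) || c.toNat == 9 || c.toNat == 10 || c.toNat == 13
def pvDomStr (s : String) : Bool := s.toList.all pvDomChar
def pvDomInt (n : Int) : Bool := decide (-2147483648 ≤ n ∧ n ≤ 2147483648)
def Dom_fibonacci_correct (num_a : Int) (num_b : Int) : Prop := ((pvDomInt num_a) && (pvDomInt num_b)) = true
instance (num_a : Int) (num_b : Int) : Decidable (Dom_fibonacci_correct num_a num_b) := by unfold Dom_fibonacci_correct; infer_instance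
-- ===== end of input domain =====

-- B replaces A's rolling-variable recurrence loop with a table of Fibonacci coefficient pairs mapped to closed-form linear combinations of the seeds (objective: alternative).


-- ===== PORT A =====
-- Literal port of A: fold over range(2,10) carrying (ret_val, num_a, num_b).
def fibonacci_correct (num_a : Int) (num_b : Int) : List Int :=
  (((PySem.List.pyRange 2 10 1).foldl
      (fun (st : List Int × Int × Int) (_ : Int) =>
        let ret_val := st.1
        let num_a := st.2.1
        let num_b := st.2.2
        let num_c := num_a + num_b
        (ret_val ++ [num_c], num_b, num_c))
      ([num_a, num_b], num_a, num_b))).1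

-- ===== PORT B =====
-- B: each term is a closed-form linear combination of the two seeds.
def fibCoeffs : List (Int × Int) :=
  [(1, 0), (0, 1), (1, 1), (1, 2), (2, 3), (3, 5), (5, 8), (8, 13), (13, 21), (21, 34)]

def fibonacci_correct_alt (num_a : Int) (num_b : Int) : List Int :=
  fibCoeffs.map (fun p => p.1 * num_a + p.2 * num_b)

-- ===== PRECONDITION & SPEC =====
def Spec_fibonacci_correct (num_a : Int) (num_b : Int) (out : List Int) : Prop := out = fibonacci_correct_alt num_a num_b
instance (num_a : Int) (num_b : Int) (out : List Int) : Decidable (Spec_fibonacci_correct num_a num_b out) := by unfold Spec_fibonacci_correct; infer_instance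

-- ===== CLAIM (what is proved, stated in full; the proofs are below) =====
def Claim_equal_fibonacci_correct : Prop := ∀ (num_a : Int) (num_b : Int), Dom_fibonacci_correct num_a num_b → Spec_fibonacci_correct num_a num_b (fibonacci_correct num_a num_b)

-- ===== LEMMAS AND PROOFS =====

-- ===== VERDICT (by name: the statement is the Claim_ definition above) =====
theorem fibonacci_correct_spec : Claim_equal_fibonacci_correct := by
  intro num_a num_b _
  unfold Spec_fibonacci_correct fibonacci_correct fibonacci_correct_alt fibCoeffs
  simp [PySem.List.pyRange, List.range_succ]
  omega
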